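-- pv_equiv track=rewrite | github.com/tomik420z/encoding | lib/primary_tools.py | txt_2_int_nums
-- ===== SOURCE A (Python) =====
-- def txt_2_int_nums(message, block_size):
--
--     hash_sums = []
--     i = 0
--     p = len(message) // block_size
--     for j in range(p + 1):
--         curr_sum = 0
--         for i in range(block_size):
--             if j * block_size + i >= len(message):
--                 break
--             curr_sum += ord(message[j * block_size + i]) * (256 ** i)
--         if curr_sum > 0:
--             hash_sums.append(curr_sum)
--
--     return hash_sums
-- ===== SOURCE B (Python) =====
-- def txt_2_int_nums(message, block_size):
--     hash_sums = []
--     for k in range(0, len(message), block_size):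
--         v = 0
--         for c in reversed(message[k:k + block_size]):
--             v = v * 256 + ord(c)
--         if v > 0:
--             hash_sums.append(v)
--     return hash_sums
-- ===== Notes on version B (the rewrite author's own statement) =====
-- stated objective: faster
-- what changed: Chunk the message with range(0, len, block_size) and compute each block's base-256 value by a Horner accumulation over the reversed slice, instead of A's index-arithmetic inner loop with break that builds a fresh 256**i power for every character (plus an extra empty j=p iteration).
import Mathlib
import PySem

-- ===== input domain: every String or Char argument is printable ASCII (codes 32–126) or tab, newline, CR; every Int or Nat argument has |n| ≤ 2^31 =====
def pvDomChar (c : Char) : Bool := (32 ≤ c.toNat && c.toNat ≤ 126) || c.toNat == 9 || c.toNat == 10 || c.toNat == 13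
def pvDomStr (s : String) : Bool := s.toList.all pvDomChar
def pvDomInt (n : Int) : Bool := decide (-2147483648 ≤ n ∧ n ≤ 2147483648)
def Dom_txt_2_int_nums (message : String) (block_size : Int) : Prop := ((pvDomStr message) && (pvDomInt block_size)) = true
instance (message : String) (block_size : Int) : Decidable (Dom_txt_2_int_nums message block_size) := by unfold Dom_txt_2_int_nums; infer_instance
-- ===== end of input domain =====

-- B re-chunks the message with range(0, len, block_size) and evaluates each block by a
-- reversed Horner accumulation instead of A's index/break inner loop with 256**i powers;
-- objective: faster (measured). Pre_ excludes only block_size = 0, where A raises ZeroDivisionError.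


-- ===== PORT A =====
-- inner 'for i in range(block_size): if j*block_size+i >= len(message): break; curr_sum += ord(...)*(256**i)'
-- (start = j*block_size is passed precomputed; fuel counts the remaining range(block_size) iterations)
def txtInner (chars : List Char) (start : Int) : Nat → Nat → Int → Int
  | 0, _, acc => acc
  | fuel+1, i, acc =>
    if start + (i : Int) ≥ (chars.length : Int) then acc
    else
      match PySem.List.pyGet? chars (start + (i : Int)) with
      | some c => txtInner chars start fuel (i+1) (acc + (c.toNat : Int) * 256 ^ i)
      | none => acc

def txt_2_int_nums (message : String) (block_size : Int) : List Int :=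
  let chars := message.toList
  let p := PySem.Int.floordiv (chars.length : Int) block_size
  (PySem.List.pyRange 0 (p + 1) 1).foldl
    (fun hash_sums j =>
      let curr_sum := txtInner chars (j * block_size) block_size.toNat 0 0
      if curr_sum > 0 then hash_sums ++ [curr_sum] else hash_sums) []

-- ===== PORT B =====
def txt_2_int_nums_alt (message : String) (block_size : Int) : List Int :=
  let chars := message.toList
  (PySem.List.pyRange 0 (chars.length : Int) block_size).foldl
    (fun hash_sums k =>
      let v := ((PySem.List.slice chars (some k) (some (k + block_size))).reverse).foldl
                 (fun v c => v * 256 + (c.toNat : Int)) 0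
      if v > 0 then hash_sums ++ [v] else hash_sums) []

-- ===== PRECONDITION & SPEC =====
-- Pre_ excludes exactly block_size = 0, where Python A raises ZeroDivisionError.
def Pre_txt_2_int_nums (message : String) (block_size : Int) : Prop := block_size ≠ 0
instance (message : String) (block_size : Int) : Decidable (Pre_txt_2_int_nums message block_size) := by unfold Pre_txt_2_int_nums; infer_instance
def pvWitness_txt_2_int_nums : String × Int := ("hello", 2)

def Spec_txt_2_int_nums (message : String) (block_size : Int) (out : List Int) : Prop := out = txt_2_int_nums_alt message block_size
instance (message : String) (block_size : Int) (out : List Int) : Decidable (Spec_txt_2_int_nums message block_size out) := by unfold Spec_txt_2_int_nums; infer_instance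

-- ===== CLAIM (what is proved, stated in full; the proofs are below) =====
def Claim_equal_txt_2_int_nums : Prop := ∀ (message : String) (block_size : Int), Dom_txt_2_int_nums message block_size → Pre_txt_2_int_nums message block_size → Spec_txt_2_int_nums message block_size (txt_2_int_nums message block_size)

-- ===== LEMMAS AND PROOFS =====

-- base-256 little-endian value of a block
def pvVal (l : List Char) : Int := l.foldr (fun c v => v * 256 + (c.toNat : Int)) 0

def pvChunk (chars : List Char) (bn k : Nat) : List Char := (chars.drop (bn * k)).take bn

theorem pvVal_nil : pvVal [] = 0 := rfl

theorem pvVal_cons (c : Char) (l : List Char) : pvVal (c :: l) = pvVal l * 256 + (c.toNat : Int) := rfl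

theorem pv_foldl_congr {α β : Type} (l : List α) (f g : β → α → β) (init : β)
    (h : ∀ acc x, f acc x = g acc x) : l.foldl f init = l.foldl g init := by
  have : f = g := funext fun a => funext fun b => h a b
  rw [this]

-- the append-if fold is filter-then-map
theorem pv_foldl_filt {α : Type} (f : α → Int) (l : List α) (acc : List Int) :
    l.foldl (fun a x => if f x > 0 then a ++ [f x] else a) acc
      = acc ++ (l.filter (fun x => decide (0 < f x))).map f := by
  induction l generalizing acc with
  | nil => simp
  | cons x t ih =>
    simp only [List.foldl_cons, List.filter_cons]
    by_cases h : 0 < f x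
    · simp [h, ih, List.append_assoc]
    · simp [h, ih]

-- A's inner loop computes the little-endian value of the fuel-bounded tail chunk
theorem txtInner_spec (chars : List Char) :
    ∀ (fuel s i : Nat) (acc : Int),
      txtInner chars (s : Int) fuel i acc
        = acc + 256 ^ i * pvVal ((chars.drop (s + i)).take fuel) := by
  intro fuel
  induction fuel with
  | zero => intro s i acc; simp [txtInner, pvVal_nil]
  | succ f ih =>
    intro s i acc
    by_cases h : chars.length ≤ s + i
    · have hge : (s : Int) + (i : Int) ≥ (chars.length : Int) := by exact_mod_cast h
      have hnil : chars.drop (s + i) = [] := List.drop_eq_nil_of_le h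
      simp [txtInner, hge, hnil, pvVal_nil]
    · push_neg at h
      have hlt : ¬ ((s : Int) + (i : Int) ≥ (chars.length : Int)) := by
        push_neg; exact_mod_cast h
      have hcast : (s : Int) + (i : Int) = ((s + i : Nat) : Int) := by push_cast; ring
      have hget : PySem.List.pyGet? chars ((s : Int) + (i : Int)) = some chars[s + i] := by
        rw [hcast, PySem.List.pyGet?_natCast, List.getElem?_eq_getElem h]
      have hdrop : chars.drop (s + i) = chars[s + i] :: chars.drop (s + i + 1) :=
        List.drop_eq_getElem_cons h
      have hrec := ih s (i + 1) (acc + (chars[s + i].toNat : Int) * 256 ^ i)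
      simp only [txtInner, hlt, if_false, hget]
      rw [hrec, hdrop]
      have hsi : s + (i + 1) = s + i + 1 := by omega
      rw [hsi, List.take_succ_cons, pvVal_cons]
      ring

-- A's per-j value, for j = k (a natural number): the value of the k-th chunk
theorem pvA_elem (chars : List Char) (bn : Nat) (k : Nat) :
    txtInner chars ((k : Int) * (bn : Int)) bn 0 0 = pvVal (pvChunk chars bn k) := by
  have hcast : ((k : Int) * (bn : Int)) = ((k * bn : Nat) : Int) := by push_cast; ring
  rw [hcast, txtInner_spec chars bn (k * bn) 0 0]
  simp [pvChunk, Nat.mul_comm]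

-- B's per-k value, for k = bn * j: the value of the j-th chunk
theorem pvB_elem (chars : List Char) (bn : Nat) (k : Nat) :
    ((PySem.List.slice chars (some ((bn : Int) * (k : Int)))
        (some ((bn : Int) * (k : Int) + (bn : Int)))).reverse).foldl
        (fun v c => v * 256 + (c.toNat : Int)) 0 = pvVal (pvChunk chars bn k) := by
  have h2 : ((bn : Int) * (k : Int) + (bn : Int)) = ((bn * k + bn : Nat) : Int) := by
    push_cast; ring
  have h1 : ((bn : Int) * (k : Int)) = ((bn * k : Nat) : Int) := by push_cast; ring
  rw [h2, h1, PySem.List.slice_natCast, List.foldl_reverse]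
  have h3 : bn * k + bn - bn * k = bn := by omega
  rw [h3]
  rfl

-- ceiling division in terms of floor division
theorem pv_ceil_div (bn m : Nat) (hbn : 0 < bn) :
    (m + bn - 1) / bn = if bn ∣ m then m / bn else m / bn + 1 := by
  by_cases hd : bn ∣ m
  · rw [if_pos hd]
    obtain ⟨q, rfl⟩ := hd
    have h1 : bn * q + bn - 1 = bn * q + (bn - 1) := by omega
    rw [h1, Nat.mul_add_div hbn, Nat.div_eq_of_lt (by omega), Nat.mul_div_cancel_left q hbn]
    omega
  · rw [if_neg hd]
    have hr : 0 < m % bn := Nat.pos_of_ne_zero (fun h => hd (Nat.dvd_of_mod_eq_zero h))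
    have hex : ∃ q r, r < bn ∧ 0 < r ∧ m = bn * q + r :=
      ⟨m / bn, m % bn, Nat.mod_lt m hbn, hr, (Nat.div_add_mod m bn).symm⟩
    obtain ⟨q, r, hltr, hrpos, rfl⟩ := hex
    have hb1 : bn * (q + 1) = bn * q + bn := by ring
    have h1 : bn * q + r + bn - 1 = bn * (q + 1) + (r - 1) := by omega
    rw [h1, Nat.mul_add_div hbn, Nat.div_eq_of_lt (by omega),
      Nat.mul_add_div hbn, Nat.div_eq_of_lt hltr]

-- the empty trailing chunk (k = m / bn when bn ∣ m) has value 0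
theorem pv_chunk_dvd_nil (chars : List Char) (bn : Nat) (hd : bn ∣ chars.length) :
    pvChunk chars bn (chars.length / bn) = [] := by
  unfold pvChunk
  rw [Nat.mul_div_cancel' hd, List.drop_length, List.take_nil]

-- ===== VERDICT (by name: the statement is the Claim_ definition above) =====
theorem txt_2_int_nums_spec : Claim_equal_txt_2_int_nums := by
  intro message block_size _ hpre
  unfold Spec_txt_2_int_nums txt_2_int_nums txt_2_int_nums_alt
  simp only []
  set chars := message.toList with hchars
  rcases lt_trichotomy block_size 0 with hneg | hz | hpos
  · -- negative step: A's inner loop runs zero iterations (fuel 0), B's range is empty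
    have hfuel : block_size.toNat = 0 := Int.toNat_of_nonpos hneg.le
    have hB : PySem.List.pyRange 0 (chars.length : Int) block_size = [] := by
      unfold PySem.List.pyRange
      simp [hpre, not_lt.mpr hneg.le, not_lt.mpr (Int.natCast_nonneg chars.length)]
    rw [hB, hfuel]
    simp only [txtInner, List.foldl_nil]
    have hconst : ∀ l : List Int, l.foldl
        (fun hash_sums (_ : Int) => if (0 : Int) > 0 then hash_sums ++ [(0 : Int)] else hash_sums)
        ([] : List Int) = [] := by
      intro l; induction l with
      | nil => rfl
      | cons x t ih => simpa using ih
    exact hconst _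
  · exact absurd hz hpre
  · -- positive step
    obtain ⟨bn, rfl⟩ : ∃ bn : Nat, block_size = (bn : Int) :=
      ⟨block_size.toNat, (Int.toNat_of_nonneg hpos.le).symm⟩
    have hbn : 0 < bn := by exact_mod_cast hpos
    set m := chars.length with hm
    -- A side: range(p+1) with p = m // bn
    have hfd : PySem.Int.floordiv (m : Int) (bn : Int) = ((m / bn : Nat) : Int) :=
      PySem.Int.floordiv_natCast m bn
    have hA1 : ((m / bn : Nat) : Int) + 1 = ((m / bn + 1 : Nat) : Int) := by push_cast; ring
    rw [hfd, hA1, PySem.List.pyRange_zero_natCast, List.foldl_map]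
    -- B side: range(0, m, bn)
    have hcnt : PySem.List.pyRange 0 (m : Int) (bn : Int)
        = (List.range ((m + bn - 1) / bn)).map (fun k : Nat => (bn : Int) * (k : Int)) := by
      rw [PySem.List.pyRange_of_pos 0 (m : Int) hpos]
      by_cases hm0 : 0 < m
      · have h0m : (0 : Int) < (m : Int) := by exact_mod_cast hm0
        rw [if_pos h0m]
        have hc : ((m : Int) - 0 + (bn : Int) - 1) = ((m + bn - 1 : Nat) : Int) := by
          push_cast; omega
        rw [hc, ← Int.natCast_div, Int.toNat_natCast]
        exact List.map_congr_left (fun k _ => by push_cast; ring)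
      · have hm0' : m = 0 := by omega
        have hnl : ¬ ((0 : Int) < (m : Int)) := by simp [hm0']
        rw [if_neg hnl]
        have hz0 : (m + bn - 1) / bn = 0 := by
          rw [hm0']; exact Nat.div_eq_of_lt (by omega)
        rw [hz0]
        simp
    rw [hcnt, List.foldl_map]
    -- both folds are filter-map folds over Nat ranges of chunk values
    have eA : (List.range (m / bn + 1)).foldl
        (fun (x : List Int) (y : Nat) =>
          if txtInner chars ((y : Int) * (bn : Int)) ((bn : Int)).toNat 0 0 > 0
          then x ++ [txtInner chars ((y : Int) * (bn : Int)) ((bn : Int)).toNat 0 0] else x) []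
        = ((List.range (m / bn + 1)).filter
            (fun k => decide (0 < pvVal (pvChunk chars bn k)))).map
            (fun k => pvVal (pvChunk chars bn k)) := by
      rw [pv_foldl_congr _ _
        (fun (x : List Int) (y : Nat) =>
          if pvVal (pvChunk chars bn y) > 0 then x ++ [pvVal (pvChunk chars bn y)] else x) _
        (fun a k => by rw [Int.toNat_natCast, pvA_elem chars bn k])]
      exact pv_foldl_filt (fun k => pvVal (pvChunk chars bn k)) _ []
    have eB : (List.range ((m + bn - 1) / bn)).foldl
        (fun (x : List Int) (y : Nat) =>
          if ((PySem.List.slice chars (some ((bn : Int) * (y : Int)))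
                (some ((bn : Int) * (y : Int) + (bn : Int)))).reverse).foldl
                (fun v c => v * 256 + (c.toNat : Int)) 0 > 0
          then x ++ [((PySem.List.slice chars (some ((bn : Int) * (y : Int)))
                (some ((bn : Int) * (y : Int) + (bn : Int)))).reverse).foldl
                (fun v c => v * 256 + (c.toNat : Int)) 0] else x) []
        = ((List.range ((m + bn - 1) / bn)).filter
            (fun k => decide (0 < pvVal (pvChunk chars bn k)))).map
            (fun k => pvVal (pvChunk chars bn k)) := by
      rw [pv_foldl_congr _ _
        (fun (x : List Int) (y : Nat) =>
          if pvVal (pvChunk chars bn y) > 0 then x ++ [pvVal (pvChunk chars bn y)] else x) _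
        (fun a k => by rw [pvB_elem chars bn k])]
      exact pv_foldl_filt (fun k => pvVal (pvChunk chars bn k)) _ []
    rw [eA, eB]
    -- the two Nat ranges give the same filtered list
    rw [pv_ceil_div bn m hbn]
    by_cases hd : bn ∣ m
    · rw [if_pos hd]
      have hq : (List.range (m / bn + 1)).filter
            (fun k => decide (0 < pvVal (pvChunk chars bn k)))
          = (List.range (m / bn)).filter
            (fun k => decide (0 < pvVal (pvChunk chars bn k)))
          ++ [m / bn].filter (fun k => decide (0 < pvVal (pvChunk chars bn k))) := by
        rw [← List.filter_append, ← List.range_succ]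
      rw [hq]
      have hnilc : pvChunk chars bn (m / bn) = [] := pv_chunk_dvd_nil chars bn hd
      simp [hnilc, pvVal_nil]
    · rw [if_neg hd]
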